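-- pv_equiv track=rewrite | github.com/mmidolesov2/neutron | neutron/common/utils.py | _gen_rules_port_max
-- ===== SOURCE A (Python) =====
-- def _hex_format(port, mask=0):
--
--     def hex_str(num):
--         return format(num, '#06x')
--     if mask > 0:
--         return "%s/%s" % (hex_str(port), hex_str(0xffff & ~mask))
--     return hex_str(port)
--
-- def _gen_rules_port_max(port_max, top_bit):
--     """
--     Encode a port range range(port_max & ~(top_bit - 1), port_max + 1) into
--     a set of bit value/masks.
--     """
--     # Processing starts with setting up mask and top_bit variables to their
--     # maximum. Top_bit has the form (1000000) with '1' pointing to the register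
--     # being processed, while mask has the form (0111111) with '1' showing
--     # possible range to be covered.
--
--     # With each rule generation cycle, mask and top_bit are bit shifted to the
--     # right. When top_bit reaches 0 it means that last register was processed.
--
--     # Let port_max be n bits long, top_bit = 1 << k, 0<=k<=n-1.
--
--     # Each cycle step checks the following conditions:
--
--     #     1). port & mask == mask
--     #     This means that remaining bits k..1 are equal to '1' and can be
--     #     covered by a single port/mask rule.
--
--     #     If condition 1 doesn't fit, then both top_bit and mask are bit
--     #     shifted to the right and condition 2 is checked:
--
--     #     2). port & top_bit == top_bit
--     #     This means that kth port bit is equal to '1'. By setting it to '0'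
--     #     and masking other (k-1) bits all ports in range
--     #     [P, P + 2^(k-1)-1] are guaranteed to be covered.
--     #     Let p_k be equal to port first (n-k) bits with rest set to 0.
--     #     Then P = p_k | ~top_bit.
--
--     # Correctness proof:
--     # The remaining range to be encoded in a cycle is calculated as follows:
--     # R = [port_max & ~mask, port_max].
--     # If condition 1 holds, then a rule that covers R is generated and the job
--     # is done.
--     # If condition 2 holds, then the rule emitted will cover 2^(k-1) values
--     # from the range. Remaining range R will shrink by 2^(k-1).
--     # If condition 2 doesn't hold, then even after top_bit/mask shift in next
--     # iteration the value of R won't change.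
--
--     # Full cycle example for range [64, 105]:
--     # port=1101001, top_bit=1000000, k=6
--     # * step 1, k=6, R=[64, 105]
--     #   top_bit=1000000, mask=0111111 -> condition 1 doesn't hold, shifting
--     #                                    mask/top_bit
--     #   top_bit=0100000, mask=0011111 -> condition 2 holds -> 10xxxxx or
--     #                                                         0x0040/ffe0
--     # * step 2, k=5, R=[96, 105]
--     #   top_bit=0100000, mask=0011111 -> condition 1 doesn't hold, shifting
--     #                                    mask/top_bit
--     #   top_bit=0010000, mask=0001111 -> condition 2 doesn't hold
--
--     # * step 3, k=4, R=[96, 105]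
--     #   top_bit=0010000, mask=0001111 -> condition 1 doesn't hold, shifting
--     #                                    mask/top_bit
--     #   top_bit=0001000, mask=0000111 -> condition 2 holds -> 1100xxx or
--     #                                                         0x0060/fff8
--     # * step 4, k=3, R=[104, 105]
--     #   top_bit=0001000, mask=0000111 -> condition 1 doesn't hold, shifting
--     #                                    mask/top_bit
--     #   top_bit=0000100, mask=0000011 -> condition 2 doesn't hold
--
--     # * step 5, k=2, R=[104, 105]
--     #   top_bit=0000100, mask=0000011 -> condition 1 doesn't hold, shifting
--     #                                    mask/top_bit
--     #   top_bit=0000010, mask=0000001 -> condition 2 doesn't hold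
--
--     # * step 6, k=1, R=[104, 105]
--     #   top_bit=0000010, mask=0000001 -> condition 1 holds -> 1101001 or
--     #                                                         0x0068
--
--     #   rules=[0x0040/ffe0, 0x0060/fff8, 0x0068]
--
--     rules = []
--     mask = top_bit - 1
--
--     while True:
--         if (port_max & mask) == mask:
--             # greedy matched a streak of '1' in port_max
--             rules.append(_hex_format(port_max & ~mask, mask))
--             break
--         top_bit >>= 1
--         mask >>= 1
--         if (port_max & top_bit) == top_bit:
--             # matched next '1' in port_max to substitute for '0' in resulting
--             # rule
--             rules.append(_hex_format(port_max & ~mask & ~top_bit, mask))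
--     return rules
-- ===== SOURCE B (Python) =====
-- def _hex_format(port, mask=0):
--
--     def hex_str(num):
--         return format(num, '#06x')
--     if mask > 0:
--         return "%s/%s" % (hex_str(port), hex_str(0xffff & ~mask))
--     return hex_str(port)
--
-- def _gen_rules_port_max(port_max, top_bit):
--     # Two-phase reformulation: first find s, the number of right shifts after
--     # which top_bit - 1 becomes a submask of port_max (the break point of the
--     # greedy loop), then emit all intermediate rules with one comprehension
--     # over the shift amounts and append the closing rule.  No mutable
--     # mask/top_bit state and no break-driven greedy interleaving.
--     s = 0
--     while port_max & ((top_bit - 1) >> s) != (top_bit - 1) >> s: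
--         s += 1
--     rules = [
--         _hex_format(port_max & ~((top_bit - 1) >> i) & ~(top_bit >> i),
--                     (top_bit - 1) >> i)
--         for i in range(1, s + 1)
--         if port_max & (top_bit >> i) == top_bit >> i
--     ]
--     rules.append(_hex_format(port_max & ~((top_bit - 1) >> s), (top_bit - 1) >> s))
--     return rules
-- ===== Notes on version B (the rewrite author's own statement) =====
-- stated objective: alternative
-- what changed: Replaces A's greedy while-True loop that mutates top_bit/mask and appends under two interleaved break/emit conditions by a two-phase form: first find the break shift count s with a simple counting loop, then build all intermediate rules with one comprehension over the shift amounts 1..s and append the closing rule.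
import Mathlib
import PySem

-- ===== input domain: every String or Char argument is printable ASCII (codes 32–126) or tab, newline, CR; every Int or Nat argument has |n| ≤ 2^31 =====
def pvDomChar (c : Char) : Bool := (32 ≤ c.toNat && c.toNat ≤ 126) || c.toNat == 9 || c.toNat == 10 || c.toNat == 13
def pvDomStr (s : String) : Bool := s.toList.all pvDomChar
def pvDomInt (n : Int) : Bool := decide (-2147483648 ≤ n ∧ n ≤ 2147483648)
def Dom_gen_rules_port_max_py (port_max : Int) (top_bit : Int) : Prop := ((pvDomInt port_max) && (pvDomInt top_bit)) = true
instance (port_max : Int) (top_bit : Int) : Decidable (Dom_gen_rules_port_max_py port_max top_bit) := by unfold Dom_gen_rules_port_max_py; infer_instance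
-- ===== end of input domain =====

-- B replaces A's greedy mutable shift/break while-loop by a two-phase form (find the break
-- shift count s, then one comprehension over shift amounts): an alternative decomposition,
-- same cost; equivalence is proved on Pre_, exactly the inputs where A's loop terminates.


-- ===== PORT A =====
-- shared helper of both Pythons: _hex_format / hex_str, i.e. format(num, '#06x').
-- PySem has no '#06x' formatter, so it is ported by hand, exact for every int:
-- sign, then "0x", then zeros padding the total length to 6, then lowercase hex digits.
def pvHexDigit (n : Nat) : Char := if n < 10 then Char.ofNat (48 + n) else Char.ofNat (87 + n)

-- hex digits of n, most significant first (fuel-structural; fuel ≥ n makes it exact)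
def pvHexAux : Nat → Nat → List Char
  | 0, _ => []
  | _ + 1, 0 => []
  | f + 1, n => pvHexAux f (n / 16) ++ [pvHexDigit (n % 16)]

def pvHexChars (n : Nat) : List Char := if n = 0 then ['0'] else pvHexAux n n

def pvHexStr (num : Int) : List Char :=
  let ds := pvHexChars num.natAbs
  let width := (if num < 0 then 1 else 0) + 2 + ds.length
  (if num < 0 then ['-'] else []) ++ ['0', 'x'] ++ List.replicate (6 - width) '0' ++ ds

def pvHexFormat (port : Int) (mask : Int) : String :=
  if 0 < mask then String.ofList (pvHexStr port ++ '/' :: pvHexStr (PySem.Int.band 65535 (Int.not mask)))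
  else String.ofList (pvHexStr port)

-- A's 'while True' loop, one constructor per iteration; the fuel only truncates runs on
-- which the Python loop never terminates (exactly the inputs outside Pre_ below).
def pvALoop (port_max : Int) : Nat → Int → Int → List String → List String
  | 0, _, _, rules => rules
  | fuel + 1, top_bit, mask, rules =>
    if PySem.Int.band port_max mask = mask then
      rules ++ [pvHexFormat (PySem.Int.band port_max (Int.not mask)) mask]
    else
      -- top_bit >>= 1; mask >>= 1 (the shifted values, inlined at each use)
      if PySem.Int.band port_max (top_bit >>> (1 : Nat)) = top_bit >>> (1 : Nat) then
        pvALoop port_max fuel (top_bit >>> (1 : Nat)) (mask >>> (1 : Nat))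
          (rules ++ [pvHexFormat (PySem.Int.band (PySem.Int.band port_max (Int.not (mask >>> (1 : Nat)))) (Int.not (top_bit >>> (1 : Nat)))) (mask >>> (1 : Nat))])
      else pvALoop port_max fuel (top_bit >>> (1 : Nat)) (mask >>> (1 : Nat)) rules

def gen_rules_port_max_py (port_max : Int) (top_bit : Int) : List String :=
  pvALoop port_max (PySem.Int.bitLength (top_bit - 1) + 1) top_bit (top_bit - 1) []

-- ===== PORT B =====
-- B phase 1: the while-loop counting shifts until (top_bit-1) >> s is a submask of port_max
def pvFindS (port_max m : Int) : Nat → Nat → Nat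
  | 0, s => s
  | fuel + 1, s =>
    if PySem.Int.band port_max (m >>> s) = m >>> s then s else pvFindS port_max m fuel (s + 1)

def gen_rules_port_max_py_alt (port_max : Int) (top_bit : Int) : List String :=
  let s := pvFindS port_max (top_bit - 1) (PySem.Int.bitLength (top_bit - 1) + 1) 0
  -- B phase 2: the comprehension over range(1, s+1) with its filter, then the closing rule
  (((List.range' 1 s).filter
      (fun (i : Nat) => PySem.Int.band port_max (top_bit >>> i) == top_bit >>> i)).map
    (fun (i : Nat) => pvHexFormat
        (PySem.Int.band (PySem.Int.band port_max (Int.not ((top_bit - 1) >>> i))) (Int.not (top_bit >>> i)))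
        ((top_bit - 1) >>> i)))
  ++ [pvHexFormat (PySem.Int.band port_max (Int.not ((top_bit - 1) >>> s))) ((top_bit - 1) >>> s)]

-- ===== PRECONDITION & SPEC =====
-- Exactly the inputs on which A's while-loop terminates: some right shift of top_bit - 1
-- (stabilised after bitLength (top_bit - 1) shifts) is a submask of port_max.  In
-- particular every top_bit ≥ 1 is admitted; outside Pre_ the Python A loops forever.
def Pre_gen_rules_port_max_py (port_max : Int) (top_bit : Int) : Prop :=
  ∃ s : Nat, s ≤ PySem.Int.bitLength (top_bit - 1) ∧
    PySem.Int.band port_max ((top_bit - 1) >>> s) = (top_bit - 1) >>> s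

instance (port_max : Int) (top_bit : Int) : Decidable (Pre_gen_rules_port_max_py port_max top_bit) := by
  unfold Pre_gen_rules_port_max_py; infer_instance

def pvWitness_gen_rules_port_max_py : Int × Int := (105, 64)

def Spec_gen_rules_port_max_py (port_max : Int) (top_bit : Int) (out : List String) : Prop := out = gen_rules_port_max_py_alt port_max top_bit
instance (port_max : Int) (top_bit : Int) (out : List String) : Decidable (Spec_gen_rules_port_max_py port_max top_bit out) := by unfold Spec_gen_rules_port_max_py; infer_instance

-- ===== CLAIM (what is proved, stated in full; the proofs are below) =====
def Claim_equal_gen_rules_port_max_py : Prop := ∀ (port_max : Int) (top_bit : Int), Dom_gen_rules_port_max_py port_max top_bit → Pre_gen_rules_port_max_py port_max top_bit → Spec_gen_rules_port_max_py port_max top_bit (gen_rules_port_max_py port_max top_bit)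

-- ===== LEMMAS AND PROOFS =====

-- B's find-loop returns the least shift count satisfying the submask test.
theorem pvFindS_eq (port_max m : Int) (sMin : Nat)
    (hmin : PySem.Int.band port_max (m >>> sMin) = m >>> sMin)
    (hlt : ∀ j < sMin, ¬ PySem.Int.band port_max (m >>> j) = m >>> j) :
    ∀ (fuel s : Nat), s ≤ sMin → sMin < s + fuel → pvFindS port_max m fuel s = sMin := by
  intro fuel
  induction fuel with
  | zero => intro s h1 h2; omega
  | succ f ih =>
    intro s h1 h2
    rw [pvFindS]
    by_cases h : PySem.Int.band port_max (m >>> s) = m >>> s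
    · rw [if_pos h]
      by_contra hne
      exact hlt s (by omega) h
    · rw [if_neg h]
      have hs : s ≠ sMin := fun he => h (he ▸ hmin)
      exact ih (s + 1) (by omega) (by omega)

-- A's loop, started at shift state i, produces B's comprehension for shifts i+1 .. sMin
-- followed by the closing rule at the break point sMin.
theorem pvALoop_eq (port_max top_bit : Int) (sMin : Nat)
    (hmin : PySem.Int.band port_max ((top_bit - 1) >>> sMin) = (top_bit - 1) >>> sMin)
    (hlt : ∀ j < sMin, ¬ PySem.Int.band port_max ((top_bit - 1) >>> j) = (top_bit - 1) >>> j) :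
    ∀ (fuel i : Nat) (rules : List String), i ≤ sMin → sMin < i + fuel →
      pvALoop port_max fuel (top_bit >>> i) ((top_bit - 1) >>> i) rules =
        rules ++
        (((List.range' (i + 1) (sMin - i)).filter
            (fun (j : Nat) => PySem.Int.band port_max (top_bit >>> j) == top_bit >>> j)).map
          (fun (j : Nat) => pvHexFormat
              (PySem.Int.band (PySem.Int.band port_max (Int.not ((top_bit - 1) >>> j))) (Int.not (top_bit >>> j)))
              ((top_bit - 1) >>> j)))
        ++ [pvHexFormat (PySem.Int.band port_max (Int.not ((top_bit - 1) >>> sMin))) ((top_bit - 1) >>> sMin)] := by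
  intro fuel
  induction fuel with
  | zero => intro i rules h1 h2; omega
  | succ f ih =>
    intro i rules h1 h2
    rw [pvALoop]
    by_cases hi : i = sMin
    · subst hi
      rw [if_pos hmin]
      simp
    · have hilt : i < sMin := by omega
      rw [if_neg (hlt i hilt)]
      have htb : (top_bit >>> i) >>> (1 : Nat) = top_bit >>> (i + 1) := (Int.shiftRight_add top_bit i 1).symm
      have hmk : ((top_bit - 1) >>> i) >>> (1 : Nat) = (top_bit - 1) >>> (i + 1) := (Int.shiftRight_add (top_bit - 1) i 1).symm
      have hrange : List.range' (i + 1) (sMin - i) = (i + 1) :: List.range' (i + 2) (sMin - i - 1) := by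
        rw [show sMin - i = (sMin - i - 1) + 1 from by omega, List.range'_succ]
        simp
      rw [htb, hmk, hrange]
      by_cases hc : PySem.Int.band port_max (top_bit >>> (i + 1)) = top_bit >>> (i + 1)
      · rw [if_pos hc]
        rw [ih (i + 1) _ (by omega) (by omega)]
        simp [hc, Nat.sub_sub]
      · rw [if_neg hc]
        rw [ih (i + 1) rules (by omega) (by omega)]
        simp [hc, Nat.sub_sub]

-- ===== VERDICT (by name: the statement is the Claim_ definition above) =====
theorem gen_rules_port_max_py_spec : Claim_equal_gen_rules_port_max_py := by
  intro port_max top_bit _ hpre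
  obtain ⟨s₀, hs₀, hP⟩ := hpre
  have hex : ∃ s : Nat, PySem.Int.band port_max ((top_bit - 1) >>> s) = (top_bit - 1) >>> s := ⟨s₀, hP⟩
  set sMin := Nat.find hex with hsMin
  have hmin := Nat.find_spec hex
  have hlt : ∀ j < sMin, ¬ PySem.Int.band port_max ((top_bit - 1) >>> j) = (top_bit - 1) >>> j :=
    fun j hj => Nat.find_min hex hj
  have hle : sMin ≤ PySem.Int.bitLength (top_bit - 1) := le_trans (Nat.find_min' hex hP) hs₀
  unfold Spec_gen_rules_port_max_py gen_rules_port_max_py gen_rules_port_max_py_alt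
  have hfind := pvFindS_eq port_max (top_bit - 1) sMin hmin hlt
      (PySem.Int.bitLength (top_bit - 1) + 1) 0 (by omega) (by omega)
  have hloop := pvALoop_eq port_max top_bit sMin hmin hlt
      (PySem.Int.bitLength (top_bit - 1) + 1) 0 [] (by omega) (by omega)
  rw [Int.shiftRight_zero, Int.shiftRight_zero] at hloop
  rw [hloop, hfind]
  simp
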